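-- pv_equiv track=rewrite | github.com/mithun789/campus-Me | src/data_engine/visualization_ai.py | recommend_visualizations
-- ===== SOURCE A (Python) =====
-- from typing import Dict, List
--
-- def recommend_visualizations(text: str) -> Dict[str, List[str]]:
--     """Recommend visualization types based on content."""
--     recommendations = {"charts": [], "tables": [], "diagrams": []}
--
--     text_lower = text.lower()
--
--     # Detect chart opportunities
--     if any(word in text_lower for word in ["compare", "comparison", "different"]):
--         recommendations["charts"].append("bar chart")
--     if any(word in text_lower for word in ["trend", "increase", "decrease", "growth"]):
--         recommendations["charts"].append("line chart")
--     if any(word in text_lower for word in ["proportion", "percentage", "part of", "composition"]):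
--         recommendations["charts"].append("pie chart")
--     if any(word in text_lower for word in ["correlation", "relationship", "distributed"]):
--         recommendations["charts"].append("scatter plot")
--
--     # Detect table opportunities
--     if any(word in text_lower for word in ["list", "summary", "data", "table", "statistics"]):
--         recommendations["tables"].append("summary table")
--     if any(word in text_lower for word in ["compare", "comparison"]):
--         recommendations["tables"].append("comparison table")
--
--     # Detect diagram opportunities
--     if any(word in text_lower for word in ["process", "step", "workflow", "procedure"]):
--         recommendations["diagrams"].append("flowchart")
--     if any(word in text_lower for word in ["hierarchy", "organization", "structure", "levels"]):
--         recommendations["diagrams"].append("hierarchy diagram")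
--
--     return recommendations
-- ===== SOURCE B (Python) =====
-- _KEYWORDS = [
--     "compare", "comparison", "different",
--     "trend", "increase", "decrease", "growth",
--     "proportion", "percentage", "part of", "composition",
--     "correlation", "relationship", "distributed",
--     "list", "summary", "data", "table", "statistics",
--     "process", "step", "workflow", "procedure",
--     "hierarchy", "organization", "structure", "levels",
-- ]
--
-- _RULES = {
--     "charts": [
--         ("bar chart", ["compare", "comparison", "different"]),
--         ("line chart", ["trend", "increase", "decrease", "growth"]),
--         ("pie chart", ["proportion", "percentage", "part of", "composition"]),
--         ("scatter plot", ["correlation", "relationship", "distributed"]),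
--     ],
--     "tables": [
--         ("summary table", ["list", "summary", "data", "table", "statistics"]),
--         ("comparison table", ["compare", "comparison"]),
--     ],
--     "diagrams": [
--         ("flowchart", ["process", "step", "workflow", "procedure"]),
--         ("hierarchy diagram", ["hierarchy", "organization", "structure", "levels"]),
--     ],
-- }
--
-- def recommend_visualizations(text):
--     """Recommend visualization types based on content."""
--     t = text.lower()
--     # Stage 1: one left-to-right scan of the text; at each position collect every
--     # keyword that starts there (no per-keyword substring search of the whole text).
--     found = set()
--     for i in range(len(t)):
--         for kw in _KEYWORDS:
--             if t.startswith(kw, i):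
--                 found.add(kw)
--     # Stage 2: assemble the recommendations from the matched-keyword set.
--     return {cat: [label for label, kws in rules if any(k in found for k in kws)]
--             for cat, rules in _RULES.items()}
-- ===== Notes on version B (the rewrite author's own statement) =====
-- stated objective: alternative
-- what changed: Instead of running one substring search over the text per keyword list (eight any(word in text) branches mutating a dict), B makes a single left-to-right positional scan of the lowered text that collects the set of all matched keywords at once, then assembles the recommendations dict from that set via a rules table.
import Mathlib
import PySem

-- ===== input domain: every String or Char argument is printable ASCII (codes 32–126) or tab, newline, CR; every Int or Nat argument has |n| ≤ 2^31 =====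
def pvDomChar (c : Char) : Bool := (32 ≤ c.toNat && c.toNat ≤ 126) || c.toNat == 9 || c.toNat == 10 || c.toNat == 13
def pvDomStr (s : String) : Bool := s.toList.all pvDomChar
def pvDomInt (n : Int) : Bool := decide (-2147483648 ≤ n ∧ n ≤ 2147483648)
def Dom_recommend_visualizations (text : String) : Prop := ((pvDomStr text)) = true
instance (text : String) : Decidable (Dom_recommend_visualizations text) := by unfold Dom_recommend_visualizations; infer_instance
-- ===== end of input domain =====

-- One honest line: B replaces A's eight per-keyword-list substring searches by one left-to-right
-- positional scan of the text that collects the set of matched keywords, then assembles the dict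
-- from that set (objective: alternative).

-- ===== PORT A =====
def recommend_visualizations (text : String) : List (String × List String) :=
  let recommendations : PySem.Dict String (List String) :=
    PySem.Dict.ofList [("charts", []), ("tables", []), ("diagrams", [])]
  let text_lower := PySem.Str.lower text
  let recommendations :=
    if ["compare", "comparison", "different"].any (fun w => PySem.Str.isIn w text_lower) then
      recommendations.modify "charts" [] (· ++ ["bar chart"]) else recommendations
  let recommendations :=
    if ["trend", "increase", "decrease", "growth"].any (fun w => PySem.Str.isIn w text_lower) then
      recommendations.modify "charts" [] (· ++ ["line chart"]) else recommendations
  let recommendations :=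
    if ["proportion", "percentage", "part of", "composition"].any (fun w => PySem.Str.isIn w text_lower) then
      recommendations.modify "charts" [] (· ++ ["pie chart"]) else recommendations
  let recommendations :=
    if ["correlation", "relationship", "distributed"].any (fun w => PySem.Str.isIn w text_lower) then
      recommendations.modify "charts" [] (· ++ ["scatter plot"]) else recommendations
  let recommendations :=
    if ["list", "summary", "data", "table", "statistics"].any (fun w => PySem.Str.isIn w text_lower) then
      recommendations.modify "tables" [] (· ++ ["summary table"]) else recommendations
  let recommendations :=
    if ["compare", "comparison"].any (fun w => PySem.Str.isIn w text_lower) then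
      recommendations.modify "tables" [] (· ++ ["comparison table"]) else recommendations
  let recommendations :=
    if ["process", "step", "workflow", "procedure"].any (fun w => PySem.Str.isIn w text_lower) then
      recommendations.modify "diagrams" [] (· ++ ["flowchart"]) else recommendations
  let recommendations :=
    if ["hierarchy", "organization", "structure", "levels"].any (fun w => PySem.Str.isIn w text_lower) then
      recommendations.modify "diagrams" [] (· ++ ["hierarchy diagram"]) else recommendations
  recommendations.items

-- ===== PORT B =====
def pvKeywords : List String :=
  ["compare", "comparison", "different",
   "trend", "increase", "decrease", "growth",
   "proportion", "percentage", "part of", "composition",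
   "correlation", "relationship", "distributed",
   "list", "summary", "data", "table", "statistics",
   "process", "step", "workflow", "procedure",
   "hierarchy", "organization", "structure", "levels"]

def pvRules : List (String × List (String × List String)) :=
  [("charts",
    [("bar chart", ["compare", "comparison", "different"]),
     ("line chart", ["trend", "increase", "decrease", "growth"]),
     ("pie chart", ["proportion", "percentage", "part of", "composition"]),
     ("scatter plot", ["correlation", "relationship", "distributed"])]),
   ("tables",
    [("summary table", ["list", "summary", "data", "table", "statistics"]),
     ("comparison table", ["compare", "comparison"])]),
   ("diagrams",
    [("flowchart", ["process", "step", "workflow", "procedure"]),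
     ("hierarchy diagram", ["hierarchy", "organization", "structure", "levels"])])]

-- the scan loop 'for i in range(len(t)): for kw in _KEYWORDS: if t.startswith(kw, i): found.add(kw)';
-- Python's t.startswith(kw, i) with 0 ≤ i ≤ len(t) is exactly "kw is a prefix of t[i:]" (exact here)
def pvFound (t : List Char) : PySem.Set String :=
  (List.range t.length).foldl (fun found i =>
    pvKeywords.foldl (fun found kw =>
      if PySem.Chars.startswith (t.drop i) kw.toList then PySem.Set.add found kw else found)
      found)
    PySem.Set.empty

def recommend_visualizations_alt (text : String) : List (String × List String) :=
  let t := (PySem.Str.lower text).toList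
  let found := pvFound t
  pvRules.map (fun cr =>
    (cr.1,
     (cr.2.filter (fun r => r.2.any (fun k => PySem.Set.contains found k))).map (fun r => r.1)))

-- ===== PRECONDITION & SPEC =====
def Spec_recommend_visualizations (text : String) (out : List (String × List String)) : Prop := out = recommend_visualizations_alt text
instance (text : String) (out : List (String × List String)) : Decidable (Spec_recommend_visualizations text out) := by unfold Spec_recommend_visualizations; infer_instance

-- ===== CLAIM (what is proved, stated in full; the proofs are below) =====
def Claim_equal_recommend_visualizations : Prop := ∀ (text : String), Dom_recommend_visualizations text → Spec_recommend_visualizations text (recommend_visualizations text)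

-- ===== LEMMAS AND PROOFS =====

-- A's body with the eight keyword tests abstracted as Booleans.
def pvChainA (b1 b2 b3 b4 b5 b6 b7 b8 : Bool) : List (String × List String) :=
  let d : PySem.Dict String (List String) :=
    PySem.Dict.ofList [("charts", []), ("tables", []), ("diagrams", [])]
  let d := if b1 then d.modify "charts" [] (· ++ ["bar chart"]) else d
  let d := if b2 then d.modify "charts" [] (· ++ ["line chart"]) else d
  let d := if b3 then d.modify "charts" [] (· ++ ["pie chart"]) else d
  let d := if b4 then d.modify "charts" [] (· ++ ["scatter plot"]) else d
  let d := if b5 then d.modify "tables" [] (· ++ ["summary table"]) else d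
  let d := if b6 then d.modify "tables" [] (· ++ ["comparison table"]) else d
  let d := if b7 then d.modify "diagrams" [] (· ++ ["flowchart"]) else d
  let d := if b8 then d.modify "diagrams" [] (· ++ ["hierarchy diagram"]) else d
  d.items

-- B's assembly stage with the eight rule conditions abstracted as Booleans.
def pvOut (b1 b2 b3 b4 b5 b6 b7 b8 : Bool) : List (String × List String) :=
  [("charts",
    (([("bar chart", b1), ("line chart", b2), ("pie chart", b3), ("scatter plot", b4)].filter
       (fun r => r.2)).map (fun r => r.1))),
   ("tables",
    (([("summary table", b5), ("comparison table", b6)].filter (fun r => r.2)).map (fun r => r.1))),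
   ("diagrams",
    (([("flowchart", b7), ("hierarchy diagram", b8)].filter (fun r => r.2)).map (fun r => r.1)))]

theorem pvChain_eq_out (b1 b2 b3 b4 b5 b6 b7 b8 : Bool) :
    pvChainA b1 b2 b3 b4 b5 b6 b7 b8 = pvOut b1 b2 b3 b4 b5 b6 b7 b8 := by
  cases b1 <;> cases b2 <;> cases b3 <;> cases b4 <;>
    cases b5 <;> cases b6 <;> cases b7 <;> cases b8 <;> decide

-- membership in the inner for-kw loop
theorem mem_innerFold (p : String → Bool) (kws : List String) (s : PySem.Set String) (x : String) :
    x ∈ kws.foldl (fun s kw => if p kw then PySem.Set.add s kw else s) s ↔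
      x ∈ s ∨ (x ∈ kws ∧ p x = true) := by
  induction kws generalizing s with
  | nil => simp
  | cons k ks ih =>
    simp only [List.foldl_cons, List.mem_cons]
    rw [ih]
    by_cases hpk : p k = true
    · simp only [hpk, if_true, PySem.Set.mem_add]
      by_cases hx : x = k
      · subst hx; simp [hpk]
      · simp [hx]
    · simp only [hpk]
      by_cases hx : x = k
      · subst hx; simp [hpk]
      · simp [hx]

-- membership in the positional scan's result
theorem mem_pvFound (t : List Char) (x : String) :
    x ∈ pvFound t ↔
      x ∈ pvKeywords ∧ ∃ i < t.length, PySem.Chars.startswith (t.drop i) x.toList = true := by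
  unfold pvFound
  have key : ∀ (n : ℕ) (s : PySem.Set String),
      x ∈ (List.range n).foldl (fun found i =>
            pvKeywords.foldl (fun found kw =>
              if PySem.Chars.startswith (t.drop i) kw.toList then PySem.Set.add found kw else found)
              found) s ↔
        x ∈ s ∨ (x ∈ pvKeywords ∧ ∃ i < n, PySem.Chars.startswith (t.drop i) x.toList = true) := by
    intro n
    induction n with
    | zero => simp
    | succ n ih =>
      intro s
      rw [List.range_succ, List.foldl_append, List.foldl_cons, List.foldl_nil,
        mem_innerFold, ih]
      constructor
      · rintro ((hs | ⟨hk, i, hi, hp⟩) | ⟨hk, hp⟩)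
        · exact Or.inl hs
        · exact Or.inr ⟨hk, i, Nat.lt_succ_of_lt hi, hp⟩
        · exact Or.inr ⟨hk, n, Nat.lt_succ_self n, hp⟩
      · rintro (hs | ⟨hk, i, hi, hp⟩)
        · exact Or.inl (Or.inl hs)
        · rcases Nat.lt_succ_iff_lt_or_eq.mp hi with h | h
          · exact Or.inl (Or.inr ⟨hk, i, h, hp⟩)
          · subst h; exact Or.inr ⟨hk, hp⟩
  rw [key]
  simp [PySem.Set.empty]

-- for a keyword of the table, set membership after the scan IS Python's 'kw in text_lower'
theorem contains_pvFound (text : String) (kw : String) (hk : kw ∈ pvKeywords) :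
    PySem.Set.contains (pvFound (PySem.Str.lower text).toList) kw
      = PySem.Str.isIn kw (PySem.Str.lower text) := by
  have hne : kw.toList ≠ [] := by
    have hall : ∀ k ∈ pvKeywords, k.toList ≠ [] := by decide
    exact hall kw hk
  rw [Bool.eq_iff_iff, PySem.Set.contains_iff, mem_pvFound, PySem.Str.isIn_eq,
    ← PySem.Chars.exists_prefix_drop_iff_isIn]
  constructor
  · rintro ⟨-, i, -, hp⟩
    exact ⟨i, (PySem.Chars.startswith_iff _ _).mp hp⟩
  · rintro ⟨j, hp⟩
    refine ⟨hk, j, ?_, (PySem.Chars.startswith_iff _ _).mpr hp⟩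
    by_contra h
    have : (PySem.Str.lower text).toList.drop j = [] :=
      List.drop_eq_nil_of_le (Nat.le_of_not_lt h)
    rw [this] at hp
    exact hne (List.prefix_nil.mp hp)

-- the port of A as pvChainA of its eight tests
theorem pvA_eq (text : String) : recommend_visualizations text = pvChainA
    (["compare", "comparison", "different"].any (fun w => PySem.Str.isIn w (PySem.Str.lower text)))
    (["trend", "increase", "decrease", "growth"].any (fun w => PySem.Str.isIn w (PySem.Str.lower text)))
    (["proportion", "percentage", "part of", "composition"].any (fun w => PySem.Str.isIn w (PySem.Str.lower text)))
    (["correlation", "relationship", "distributed"].any (fun w => PySem.Str.isIn w (PySem.Str.lower text)))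
    (["list", "summary", "data", "table", "statistics"].any (fun w => PySem.Str.isIn w (PySem.Str.lower text)))
    (["compare", "comparison"].any (fun w => PySem.Str.isIn w (PySem.Str.lower text)))
    (["process", "step", "workflow", "procedure"].any (fun w => PySem.Str.isIn w (PySem.Str.lower text)))
    (["hierarchy", "organization", "structure", "levels"].any (fun w => PySem.Str.isIn w (PySem.Str.lower text))) := rfl

-- the port of B as pvOut of the same eight tests
theorem pvB_eq (text : String) : recommend_visualizations_alt text = pvOut
    (["compare", "comparison", "different"].any (fun w => PySem.Str.isIn w (PySem.Str.lower text)))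
    (["trend", "increase", "decrease", "growth"].any (fun w => PySem.Str.isIn w (PySem.Str.lower text)))
    (["proportion", "percentage", "part of", "composition"].any (fun w => PySem.Str.isIn w (PySem.Str.lower text)))
    (["correlation", "relationship", "distributed"].any (fun w => PySem.Str.isIn w (PySem.Str.lower text)))
    (["list", "summary", "data", "table", "statistics"].any (fun w => PySem.Str.isIn w (PySem.Str.lower text)))
    (["compare", "comparison"].any (fun w => PySem.Str.isIn w (PySem.Str.lower text)))
    (["process", "step", "workflow", "procedure"].any (fun w => PySem.Str.isIn w (PySem.Str.lower text)))
    (["hierarchy", "organization", "structure", "levels"].any (fun w => PySem.Str.isIn w (PySem.Str.lower text))) := by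
  have h0 := contains_pvFound text "compare" (by decide)
  have h1 := contains_pvFound text "comparison" (by decide)
  have h2 := contains_pvFound text "different" (by decide)
  have h3 := contains_pvFound text "trend" (by decide)
  have h4 := contains_pvFound text "increase" (by decide)
  have h5 := contains_pvFound text "decrease" (by decide)
  have h6 := contains_pvFound text "growth" (by decide)
  have h7 := contains_pvFound text "proportion" (by decide)
  have h8 := contains_pvFound text "percentage" (by decide)
  have h9 := contains_pvFound text "part of" (by decide)
  have h10 := contains_pvFound text "composition" (by decide)
  have h11 := contains_pvFound text "correlation" (by decide)
  have h12 := contains_pvFound text "relationship" (by decide)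
  have h13 := contains_pvFound text "distributed" (by decide)
  have h14 := contains_pvFound text "list" (by decide)
  have h15 := contains_pvFound text "summary" (by decide)
  have h16 := contains_pvFound text "data" (by decide)
  have h17 := contains_pvFound text "table" (by decide)
  have h18 := contains_pvFound text "statistics" (by decide)
  have h19 := contains_pvFound text "process" (by decide)
  have h20 := contains_pvFound text "step" (by decide)
  have h21 := contains_pvFound text "workflow" (by decide)
  have h22 := contains_pvFound text "procedure" (by decide)
  have h23 := contains_pvFound text "hierarchy" (by decide)
  have h24 := contains_pvFound text "organization" (by decide)
  have h25 := contains_pvFound text "levels" (by decide)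
  have h26 := contains_pvFound text "structure" (by decide)
  simp only [recommend_visualizations_alt, pvRules, pvOut, List.map_cons, List.map_nil,
    List.filter_cons, List.filter_nil, List.any_cons, List.any_nil,
    h0, h1, h2, h3, h4, h5, h6, h7, h8, h9, h10, h11, h12, h13, h14, h15, h16, h17, h18,
    h19, h20, h21, h22, h23, h24, h25, h26,
    apply_ite (List.map (fun (r : String × List String) => r.1)),
    apply_ite (List.map (fun (r : String × Bool) => r.1))]

-- ===== VERDICT (by name: the statement is the Claim_ definition above) =====
theorem recommend_visualizations_spec : Claim_equal_recommend_visualizations := by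
  intro text _
  unfold Spec_recommend_visualizations
  rw [pvA_eq text, pvB_eq text, pvChain_eq_out]
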